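-- pv_equiv track=rewrite | github.com/DianaElenaStancu/UBB | Year 1/Semester 1/FP/examen/scris/empty.py | searchSeqOrd
-- ===== SOURCE A (Python) =====
-- def searchSeqOrd(el, l):
--     if len(l) == 0:
--         return 0
--     poz = -1
--     for i in range(len(l)):
--         if el <= l[i]:
--             poz = i
--     if poz == -1:
--         return len(l)
--     return poz
--
-- l = [4,5,7,0,2,4,7,2]
-- ===== SOURCE B (Python) =====
-- def searchSeqOrd(el, l):
--     for i in range(len(l) - 1, -1, -1):
--         if el <= l[i]:
--             return i
--     return len(l)
-- ===== Notes on version B (the rewrite author's own statement) =====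
-- stated objective: simpler
-- what changed: B scans backward with an early return at the first (i.e. last-in-forward-order) index satisfying el <= l[i], instead of A's full forward scan that keeps overwriting the answer; the empty-list guard disappears since the empty backward loop already yields len(l) == 0.
import Mathlib
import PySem

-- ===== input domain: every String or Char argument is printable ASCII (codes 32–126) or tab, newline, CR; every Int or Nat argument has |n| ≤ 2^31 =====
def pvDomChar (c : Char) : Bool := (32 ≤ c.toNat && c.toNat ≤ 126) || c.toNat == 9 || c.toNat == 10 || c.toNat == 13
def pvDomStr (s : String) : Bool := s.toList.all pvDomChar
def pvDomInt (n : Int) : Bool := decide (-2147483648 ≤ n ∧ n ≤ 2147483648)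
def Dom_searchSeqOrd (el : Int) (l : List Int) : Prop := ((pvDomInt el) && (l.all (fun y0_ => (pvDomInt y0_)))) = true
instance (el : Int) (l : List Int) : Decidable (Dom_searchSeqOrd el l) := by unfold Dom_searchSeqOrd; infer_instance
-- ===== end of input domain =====

-- B replaces A's forward accumulate-the-last-match scan by a backward scan with an early
-- return at the first hit (no empty-list guard needed); return value only, no side effects.

-- ===== PORT A =====
def searchSeqOrd (el : Int) (l : List Int) : Int :=
  if (l.length : Int) = 0 then 0
  else
    let poz := (PySem.List.pyRange 0 (l.length : Int) 1).foldl
      (fun poz i => if el ≤ PySem.List.pyGetD l i 0 then i else poz) (-1 : Int)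
    if poz = -1 then (l.length : Int) else poz

-- ===== PORT B =====
-- early-return 'for i in range(len(l)-1, -1, -1)' loop, transcribed as recursion on the index list
def searchSeqOrdLoop (el : Int) (l : List Int) : List Int → Option Int
  | [] => none
  | i :: rest => if el ≤ PySem.List.pyGetD l i 0 then some i else searchSeqOrdLoop el l rest

def searchSeqOrd_alt (el : Int) (l : List Int) : Int :=
  (searchSeqOrdLoop el l (PySem.List.pyRange ((l.length : Int) - 1) (-1) (-1))).getD (l.length : Int)

-- ===== PRECONDITION & SPEC =====
def Spec_searchSeqOrd (el : Int) (l : List Int) (out : Int) : Prop := out = searchSeqOrd_alt el l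
instance (el : Int) (l : List Int) (out : Int) : Decidable (Spec_searchSeqOrd el l out) := by unfold Spec_searchSeqOrd; infer_instance

-- ===== CLAIM (what is proved, stated in full; the proofs are below) =====
def Claim_equal_searchSeqOrd : Prop := ∀ (el : Int) (l : List Int), Dom_searchSeqOrd el l → Spec_searchSeqOrd el l (searchSeqOrd el l)

-- ===== LEMMAS AND PROOFS =====

-- B's loop is find-first on its index list
theorem searchSeqOrdLoop_eq_find? (el : Int) (l : List Int) (js : List Int) :
    searchSeqOrdLoop el l js = js.find? (fun i => decide (el ≤ PySem.List.pyGetD l i 0)) := by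
  induction js with
  | nil => rfl
  | cons j rest ih =>
      simp only [searchSeqOrdLoop, List.find?]
      by_cases h : el ≤ PySem.List.pyGetD l j 0 <;> simp [h, ih]

-- A's fold keeps the LAST match: it equals find-first on the reversed list
theorem foldl_last_match (p : Int → Prop) [DecidablePred p] (js : List Int) (init : Int) :
    js.foldl (fun poz i => if p i then i else poz) init
      = (js.reverse.find? (fun i => decide (p i))).getD init := by
  induction js generalizing init with
  | nil => rfl
  | cons x rest ih =>
      simp only [List.foldl_cons, List.reverse_cons, List.find?_append]
      rw [ih]
      cases h : rest.reverse.find? (fun i => decide (p i)) with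
      | some v => simp
      | none =>
          by_cases hx : p x <;> simp [List.find?, hx]

theorem searchSeqOrd_eq (el : Int) (l : List Int) : searchSeqOrd el l = searchSeqOrd_alt el l := by
  unfold searchSeqOrd searchSeqOrd_alt
  rw [searchSeqOrdLoop_eq_find?]
  have hrev : PySem.List.pyRange ((l.length : Int) - 1) (-1) (-1)
      = (PySem.List.pyRange 0 (l.length : Int) 1).reverse := by
    rw [PySem.List.pyRange_neg_one_eq_reverse]
    norm_num
  rw [hrev, foldl_last_match]
  cases h : (PySem.List.pyRange 0 (l.length : Int) 1).reverse.find?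
      (fun i => decide (el ≤ PySem.List.pyGetD l i 0)) with
  | none =>
      simp only [Option.getD_none]
      split_ifs <;> omega
  | some v =>
      have hv : v ∈ PySem.List.pyRange 0 (l.length : Int) 1 :=
        List.mem_reverse.mp (List.mem_of_find?_eq_some h)
      have h0 : 0 ≤ v := (PySem.List.mem_pyRange_one.mp hv).1
      have hlen : (0:Int) < (l.length : Int) := lt_of_le_of_lt h0 (PySem.List.mem_pyRange_one.mp hv).2
      have hne : (l.length : Int) ≠ 0 := ne_of_gt hlen
      simp only [Option.getD_some]
      split_ifs <;> omega

-- ===== VERDICT (by name: the statement is the Claim_ definition above) =====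
theorem searchSeqOrd_spec : Claim_equal_searchSeqOrd := by
  intro el l _
  unfold Spec_searchSeqOrd
  exact searchSeqOrd_eq el l
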